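-- pv_equiv track=rewrite | github.com/IdbiDev/Phonenumber-Verifier | gyvakk/telefonszam.py | replaceStrWithNumber
-- ===== SOURCE A (Python) =====
-- def replaceStrWithNumber(string, number: str):
--     ret = list(string)
--     for k, v in enumerate(ret):
--         try:
--             ret[k] = number[k]
--         except Exception:
--             ret[k] = " "
--     return "".join(ret)
-- ===== SOURCE B (Python) =====
-- def replaceStrWithNumber(string, number: str):
--     n = len(list(string))
--     return number[:n].ljust(n)
-- ===== Notes on version B (the rewrite author's own statement) =====
-- stated objective: simpler
-- what changed: Replaces the per-position loop and try/except overwrite with a closed-form slice-and-pad: number[:n].ljust(n) where n = len(list(string)).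
import Mathlib
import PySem

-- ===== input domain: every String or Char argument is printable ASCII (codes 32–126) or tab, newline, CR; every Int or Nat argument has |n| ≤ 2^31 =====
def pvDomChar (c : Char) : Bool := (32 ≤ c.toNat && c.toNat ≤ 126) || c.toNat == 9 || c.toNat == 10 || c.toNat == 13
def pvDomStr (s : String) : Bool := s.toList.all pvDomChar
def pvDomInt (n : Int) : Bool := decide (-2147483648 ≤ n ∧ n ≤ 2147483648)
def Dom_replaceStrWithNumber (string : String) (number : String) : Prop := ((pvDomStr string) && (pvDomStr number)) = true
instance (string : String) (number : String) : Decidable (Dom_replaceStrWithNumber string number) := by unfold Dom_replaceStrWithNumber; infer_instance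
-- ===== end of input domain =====

-- B replaces A's per-index overwrite loop with the closed form number[:n].ljust(n), n = len(list(string)); simpler, same cost.


-- ===== PORT A =====
-- the loop writes ret[k] := number[k] (or ' ' on IndexError) at each position k in order;
-- ported as the obvious structural recursion over ret with the running index k
def replaceStrWithNumberGo (number : String) (k : Nat) : List Char → List Char
  | [] => []
  | _ :: rest =>
    match PySem.Str.pyGet? number (Int.ofNat k) with
    | some c => c :: replaceStrWithNumberGo number (k + 1) rest
    | none => ' ' :: replaceStrWithNumberGo number (k + 1) rest

def replaceStrWithNumber (string : String) (number : String) : String :=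
  String.mk (replaceStrWithNumberGo number 0 string.toList)

-- ===== PORT B =====
-- Source B: n = len(list(string)); return number[:n].ljust(n)
def replaceStrWithNumber_alt (string : String) (number : String) : String :=
  let n := string.toList.length
  let s := number.toList.take n
  String.mk (s ++ List.replicate (n - s.length) ' ')

-- ===== PRECONDITION & SPEC =====
def Spec_replaceStrWithNumber (string : String) (number : String) (out : String) : Prop := out = replaceStrWithNumber_alt string number
instance (string : String) (number : String) (out : String) : Decidable (Spec_replaceStrWithNumber string number out) := by unfold Spec_replaceStrWithNumber; infer_instance

-- ===== CLAIM (what is proved, stated in full; the proofs are below) =====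
def Claim_equal_replaceStrWithNumber : Prop := ∀ (string : String) (number : String), Dom_replaceStrWithNumber string number → Spec_replaceStrWithNumber string number (replaceStrWithNumber string number)

-- ===== LEMMAS AND PROOFS =====

theorem replaceStrWithNumberGo_eq (number : String) (cs : List Char) (k : Nat) :
    replaceStrWithNumberGo number k cs =
      (number.toList.drop k).take cs.length ++
        List.replicate (cs.length - (number.toList.drop k).length) ' ' := by
  induction cs generalizing k with
  | nil => simp [replaceStrWithNumberGo]
  | cons c rest ih =>
    have hget : PySem.Str.pyGet? number (Int.ofNat k) = number.toList[k]? := by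
      simpa using PySem.Str.pyGet?_natCast number (k : Nat)
    rcases hd : number.toList.drop k with _ | ⟨x, xs⟩
    · have hk : number.toList.length ≤ k := List.drop_eq_nil_iff.mp hd
      have hnone : number.toList[k]? = none := by
        exact List.getElem?_eq_none hk
      have hd1 : number.toList.drop (k + 1) = [] := List.drop_eq_nil_of_le (by omega)
      simp [replaceStrWithNumberGo, hget, hnone, ih, hd, hd1, List.replicate_succ]
    · have hk : k < number.toList.length := by
        by_contra h
        have : number.toList.drop k = [] := List.drop_eq_nil_of_le (by omega)
        rw [this] at hd; cases hd
      have hx : number.toList[k]? = some x := by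
        have h1 : (number.toList.drop k)[0]? = some x := by rw [hd]; rfl
        rw [List.getElem?_drop] at h1; simpa using h1
      have hd1 : number.toList.drop (k + 1) = xs := by
        rw [← List.drop_drop, hd]; rfl
      simp [replaceStrWithNumberGo, hget, hx, ih, hd, hd1]

-- ===== VERDICT (by name: the statement is the Claim_ definition above) =====
theorem replaceStrWithNumber_spec : Claim_equal_replaceStrWithNumber := by
  intro string number _
  unfold Spec_replaceStrWithNumber replaceStrWithNumber replaceStrWithNumber_alt
  rw [replaceStrWithNumberGo_eq]
  refine congrArg String.mk ?_
  simp only [List.drop_zero, List.length_take]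
  congr 1
  congr 1
  omega
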